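-- pv_equiv track=rewrite | github.com/anmaletic/PMA-Code | Test/6_2_compare.py | makniGetNajvece4
-- ===== SOURCE A (Python) =====
-- def makniGetNajvece4(lista:list, n:int):
--     while n > 0:
--         m = max(lista)
--         try:
--             while True:
--                 lista.remove(m)
--         except:
--             pass
--         n -= 1
--
--     return lista
-- ===== SOURCE B (Python) =====
-- def makniGetNajvece4(lista: list, n: int):
--     if n > 0:
--         top = set(sorted(set(lista), reverse=True)[:n])
--         lista[:] = [x for x in lista if x not in top]
--     return lista
-- ===== Notes on version B (the rewrite author's own statement) =====
-- stated objective: faster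
-- what changed: Instead of A's loop that n times scans for the max and repeatedly calls list.remove, B sorts the distinct values once, takes the n largest as a set of thresholds, and filters the list in a single pass.
import Mathlib
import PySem

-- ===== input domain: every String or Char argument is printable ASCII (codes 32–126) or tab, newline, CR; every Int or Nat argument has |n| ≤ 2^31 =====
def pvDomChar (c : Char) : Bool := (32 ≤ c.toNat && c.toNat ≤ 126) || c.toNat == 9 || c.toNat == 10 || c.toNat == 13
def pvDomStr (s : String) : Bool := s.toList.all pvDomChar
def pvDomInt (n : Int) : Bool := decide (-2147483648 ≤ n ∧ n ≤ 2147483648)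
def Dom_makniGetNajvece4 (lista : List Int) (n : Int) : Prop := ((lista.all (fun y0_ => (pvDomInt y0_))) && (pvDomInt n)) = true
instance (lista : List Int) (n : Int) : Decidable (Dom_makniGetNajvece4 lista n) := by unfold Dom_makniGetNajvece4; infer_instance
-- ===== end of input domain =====

-- B replaces A's repeated max-scan-and-remove loop by one sort of the distinct values
-- and a single filter pass (objective: faster). Both A and B mutate `lista` in place in
-- Python (A via remove, B via slice assignment); the equivalence proved here is about the
-- return value.


-- ===== PORT A =====
-- inner loop: 'while True: lista.remove(m)' until ValueError is swallowed by 'except: pass'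
def removeLoopA (m : Int) (lista : List Int) : List Int :=
  match h : PySem.List.remove? lista m with
  | none => lista
  | some l' => removeLoopA m l'
termination_by lista.length
decreasing_by
  have hm : m ∈ lista := by
    by_contra hc
    rw [(PySem.List.remove?_eq_none_iff lista m).mpr hc] at h
    simp at h
  rw [PySem.List.remove?_eq_some_erase lista m hm] at h
  cases h
  have := List.length_erase_of_mem hm
  have : 0 < lista.length := List.length_pos_of_mem hm
  omega

-- outer loop: 'while n > 0: m = max(lista); …; n -= 1'
def loopA (lista : List Int) : Nat → List Int
  | 0 => lista
  | k+1 =>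
    match PySem.List.max? lista (fun x => x) with
    | none => lista   -- Python raises ValueError here (max of empty list); excluded by Pre_
    | some m => loopA (removeLoopA m lista) k

def makniGetNajvece4 (lista : List Int) (n : Int) : List Int :=
  loopA lista n.toNat

-- ===== PORT B =====
def makniGetNajvece4_alt (lista : List Int) (n : Int) : List Int :=
  if 0 < n then
    let top := PySem.Set.ofList (PySem.List.slice
      (PySem.List.sorted (PySem.Set.ofList lista) (fun x => x) true) none (some n))
    lista.filter (fun x => !(PySem.Set.contains top x))
  else lista

-- ===== PRECONDITION & SPEC =====
-- Pre_ excludes exactly the inputs on which A raises ValueError: n larger than the number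
-- of distinct values (then max() is called on an emptied list).
def Pre_makniGetNajvece4 (lista : List Int) (n : Int) : Prop :=
  0 < n → n ≤ ((PySem.Set.ofList lista).length : Int)
instance (lista : List Int) (n : Int) : Decidable (Pre_makniGetNajvece4 lista n) := by
  unfold Pre_makniGetNajvece4; infer_instance

def pvWitness_makniGetNajvece4 : List Int × Int := ([3, 1, 3, 2], 2)

def Spec_makniGetNajvece4 (lista : List Int) (n : Int) (out : List Int) : Prop := out = makniGetNajvece4_alt lista n
instance (lista : List Int) (n : Int) (out : List Int) : Decidable (Spec_makniGetNajvece4 lista n out) := by unfold Spec_makniGetNajvece4; infer_instance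

-- ===== CLAIM (what is proved, stated in full; the proofs are below) =====
def Claim_equal_makniGetNajvece4 : Prop := ∀ (lista : List Int) (n : Int), Dom_makniGetNajvece4 lista n → Pre_makniGetNajvece4 lista n → Spec_makniGetNajvece4 lista n (makniGetNajvece4 lista n)

-- ===== LEMMAS AND PROOFS =====

-- the repeated-remove loop deletes every occurrence of m
lemma removeLoopA_eq_filter (m : Int) (l : List Int) :
    removeLoopA m l = l.filter (fun x => x != m) := by
  fun_induction removeLoopA m l with
  | case1 l h =>
    rw [PySem.List.remove?_eq_none_iff] at h
    rw [List.filter_eq_self.mpr]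
    intro a ha
    simp only [bne_iff_ne, ne_eq]
    exact fun hc => h (hc ▸ ha)
  | case2 l l' h ih =>
    have hm : m ∈ l := by
      by_contra hc
      rw [(PySem.List.remove?_eq_none_iff l m).mpr hc] at h
      simp at h
    rw [PySem.List.remove?_eq_some_erase l m hm] at h
    cases h
    rw [ih]
    -- filtering (· ≠ m) is unchanged by erasing one occurrence of m
    clear ih hm
    induction l with
    | nil => rfl
    | cons a t iht =>
      by_cases ha : a = m
      · subst ha; simp
      · simp [ha, iht]

-- shorthand for the sorted distinct values, descending
def sdDesc (l : List Int) : List Int :=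
  PySem.List.sorted (PySem.Set.ofList l) (fun x => x) true

lemma sdDesc_pairwise_gt (l : List Int) : (sdDesc l).Pairwise (fun a b => b < a) := by
  have hnd : (sdDesc l).Nodup :=
    ((PySem.List.sorted_perm (PySem.Set.ofList l) (fun x => x) true).nodup_iff).mpr
      (PySem.Set.nodup_ofList l)
  have hle : (sdDesc l).Pairwise (fun a b => b ≤ a) :=
    PySem.List.sorted_pairwise_rev (PySem.Set.ofList l) (fun x => x)
  have := hle.and hnd
  exact this.imp (fun h => lt_of_le_of_ne h.1 (fun hc => h.2 hc.symm))

lemma mem_sdDesc (l : List Int) (x : Int) : x ∈ sdDesc l ↔ x ∈ l := by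
  rw [sdDesc, PySem.List.mem_sorted, PySem.Set.mem_ofList]

lemma length_sdDesc (l : List Int) : (sdDesc l).length = (PySem.Set.ofList l).length :=
  PySem.List.length_sorted _ _ _

-- peeling the maximum: the descending sorted distinct list of l is m followed by that of l with m removed
lemma sdDesc_cons_of_max (l : List Int) (m : Int)
    (hm : PySem.List.max? l (fun x => x) = some m) :
    sdDesc l = m :: sdDesc (l.filter (fun x => x != m)) := by
  apply PySem.List.sorted_rev_eq_of_perm_of_pairwise_gt
  · rw [List.perm_ext_iff_of_nodup]
    · intro a
      simp only [List.mem_cons, mem_sdDesc, List.mem_filter, PySem.Set.mem_ofList,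
        bne_iff_ne, ne_eq]
      constructor
      · rintro (rfl | ⟨ha, _⟩)
        · exact PySem.List.max?_mem hm
        · exact ha
      · intro ha
        by_cases hx : a = m
        · exact Or.inl hx
        · exact Or.inr ⟨ha, hx⟩
    · refine List.nodup_cons.mpr ⟨?_, (((PySem.List.sorted_perm _ _ _).nodup_iff).mpr
        (PySem.Set.nodup_ofList _))⟩
      rw [mem_sdDesc]
      simp
    · exact PySem.Set.nodup_ofList l
  · refine List.pairwise_cons.mpr ⟨?_, sdDesc_pairwise_gt _⟩
    intro b hb
    rw [mem_sdDesc, List.mem_filter] at hb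
    have hle := PySem.List.max?_isMax hm b hb.1
    have hne : b ≠ m := by simpa using hb.2
    exact lt_of_le_of_ne hle hne

-- the loop invariant: k passes of A remove exactly the k largest distinct values
lemma loopA_eq_filter (k : Nat) :
    ∀ (l : List Int), k ≤ (PySem.Set.ofList l).length →
      loopA l k = l.filter (fun x => !(((sdDesc l).take k).contains x)) := by
  induction k with
  | zero => intro l _; simp [loopA]
  | succ k ih =>
    intro l hk
    have hne : l ≠ [] := by
      rintro rfl
      simp [PySem.Set.ofList] at hk
    obtain ⟨m, hm⟩ : ∃ m, PySem.List.max? l (fun x => x) = some m := by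
      cases h : PySem.List.max? l (fun x => x) with
      | none => exact absurd ((PySem.List.max?_eq_none_iff l _).mp h) hne
      | some m => exact ⟨m, rfl⟩
    have hpeel := sdDesc_cons_of_max l m hm
    have hlen : k ≤ (PySem.Set.ofList (l.filter (fun x => x != m))).length := by
      have h1 := length_sdDesc l
      have h2 := length_sdDesc (l.filter (fun x => x != m))
      rw [hpeel] at h1
      simp only [List.length_cons] at h1
      omega
    rw [loopA, hm]
    show loopA (removeLoopA m l) k = _
    rw [removeLoopA_eq_filter, ih _ hlen, hpeel]
    rw [List.filter_filter]
    apply List.filter_congr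
    intro a _
    simp only [List.take_succ_cons, List.contains_cons]
    by_cases ha : a = m <;> simp [ha, Bool.and_comm, bne]

-- ===== VERDICT (by name: the statement is the Claim_ definition above) =====
theorem makniGetNajvece4_spec : Claim_equal_makniGetNajvece4 := by
  intro lista n _ hpre
  unfold Spec_makniGetNajvece4 makniGetNajvece4 makniGetNajvece4_alt
  by_cases hn : 0 < n
  · rw [if_pos hn, PySem.List.slice_to _ (le_of_lt hn)]
    have hk : n.toNat ≤ (PySem.Set.ofList lista).length := Int.toNat_le.mpr (hpre hn)
    have hnodup : ((sdDesc lista).take n.toNat).Nodup :=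
      (List.take_sublist _ _).nodup
        (((PySem.List.sorted_perm (PySem.Set.ofList lista) (fun x => x) true).nodup_iff).mpr
          (PySem.Set.nodup_ofList lista))
    show loopA lista n.toNat =
      List.filter (fun x => !(PySem.Set.ofList ((sdDesc lista).take n.toNat)).contains x) lista
    rw [PySem.Set.ofList_eq_self_of_nodup _ hnodup]
    exact loopA_eq_filter n.toNat lista hk
  · rw [if_neg hn]
    have : n.toNat = 0 := by omega
    rw [this]
    rfl
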